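-- pv_equiv track=rewrite | github.com/yamaton/CodeForces | problemSet/554A-Kyoya_and_Photobooks.py | solve
-- ===== SOURCE A (Python) =====
-- def solve(s):
--     letters = set(s)
--     letter_count = len(letters)
--     size = len(s)
--
--     distinct_count = (26 - letter_count) * (size + 1)
--
--     duplicates = {s[:i] + let + s[i:] for let in letters for i in range(0, size+1)}
--     duplicate_count = len(duplicates)
--     return distinct_count + duplicate_count
-- ===== SOURCE B (Python) =====
-- def solve(s):
--     n = len(s)
--     return 26 * (n + 1) - n
-- ===== Notes on version B (the rewrite author's own statement) =====
-- stated objective: faster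
-- what changed: Replaced A's explicit construction and deduplication of all k*(n+1) insertion strings by the closed-form count 26*(n+1) - n, proved equal by an inclusion-exclusion induction on the string.
import Mathlib
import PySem

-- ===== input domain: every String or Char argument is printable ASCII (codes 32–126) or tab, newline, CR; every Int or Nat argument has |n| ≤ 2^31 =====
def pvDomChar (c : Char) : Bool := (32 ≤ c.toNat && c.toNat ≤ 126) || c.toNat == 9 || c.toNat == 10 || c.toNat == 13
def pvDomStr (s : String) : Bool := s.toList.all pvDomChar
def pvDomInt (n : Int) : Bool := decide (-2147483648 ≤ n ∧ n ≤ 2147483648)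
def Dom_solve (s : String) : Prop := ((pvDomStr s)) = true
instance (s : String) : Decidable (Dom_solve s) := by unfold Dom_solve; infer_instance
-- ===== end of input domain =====

-- B replaces A's construction and deduplication of all insertion strings by the
-- closed-form count 26*(len+1) - len (objective: faster, asymptotic).

-- ===== PORT A =====
def solve (s : String) : Int :=
  let cs := s.toList
  let letters : PySem.Set Char := PySem.Set.ofList cs
  let letterCount : Int := PySem.Set.len letters
  let size : Int := PySem.Str.len s
  let distinctCount : Int := (26 - letterCount) * (size + 1)
  let duplicates : PySem.Set (List Char) :=
    PySem.Set.ofList (letters.flatMap (fun c =>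
      (PySem.List.pyRange 0 (size + 1) 1).map (fun i =>
        PySem.List.slice cs none (some i) ++ [c] ++ PySem.List.slice cs (some i) none)))
  distinctCount + PySem.Set.len duplicates

-- ===== PORT B =====
def solve_alt (s : String) : Int :=
  let n := PySem.Str.len s
  26 * (n + 1) - n

-- ===== PRECONDITION & SPEC =====
def Spec_solve (s : String) (out : Int) : Prop := out = solve_alt s
instance (s : String) (out : Int) : Decidable (Spec_solve s out) := by unfold Spec_solve; infer_instance

-- ===== CLAIM (what is proved, stated in full; the proofs are below) =====
def Claim_equal_solve : Prop := ∀ (s : String), Dom_solve s → Spec_solve s (solve s)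

-- ===== LEMMAS AND PROOFS =====

-- inserting c at position i into cs (the value s[:i] + c + s[i:] computes)
def pvIns (cs : List Char) (c : Char) (i : Nat) : List Char := cs.take i ++ c :: cs.drop i

-- all insertions of a letter of S at any position of cs
def pvInsAll (S cs : List Char) : List (List Char) :=
  S.flatMap (fun c => (List.range (cs.length + 1)).map (fun i => pvIns cs c i))

theorem pvIns_zero (cs : List Char) (c : Char) : pvIns cs c 0 = c :: cs := rfl

theorem pvIns_succ_cons (a : Char) (tl : List Char) (c : Char) (i : Nat) :
    pvIns (a :: tl) c (i + 1) = a :: pvIns tl c i := by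
  simp [pvIns]

theorem mem_pvInsAll {S cs : List Char} {x : List Char} :
    x ∈ pvInsAll S cs ↔ ∃ c ∈ S, ∃ i < cs.length + 1, x = pvIns cs c i := by
  simp [pvInsAll, eq_comm]

-- decomposition of the insertion set of a :: tl
theorem pvInsAll_cons_toFinset (S : List Char) (a : Char) (tl : List Char) :
    (pvInsAll S (a :: tl)).toFinset =
      (S.map (fun c => c :: a :: tl)).toFinset ∪
        Finset.image (fun u => a :: u) (pvInsAll S tl).toFinset := by
  ext x
  simp only [List.mem_toFinset, Finset.mem_union, Finset.mem_image, List.mem_map,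
    mem_pvInsAll]
  constructor
  · rintro ⟨c, hc, i, hi, rfl⟩
    cases i with
    | zero => exact Or.inl ⟨c, hc, (pvIns_zero _ _).symm⟩
    | succ j =>
        refine Or.inr ⟨pvIns tl c j, ⟨c, hc, j, by simpa using hi, rfl⟩,
          (pvIns_succ_cons a tl c j).symm⟩
  · rintro (⟨c, hc, rfl⟩ | ⟨u, ⟨c, hc, j, hj, rfl⟩, rfl⟩)
    · exact ⟨c, hc, 0, by omega, (pvIns_zero _ _).symm⟩
    · exact ⟨c, hc, j + 1, by simpa using hj, (pvIns_succ_cons a tl c j).symm⟩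

-- the counting invariant: (# distinct insertions) + |cs| = (|cs|+1) * |S|
theorem pvInsAll_card (S cs : List Char) (hS : S.Nodup) (hsub : ∀ x ∈ cs, x ∈ S) :
    (pvInsAll S cs).toFinset.card + cs.length = (cs.length + 1) * S.length := by
  induction cs with
  | nil =>
      have h1 : pvInsAll S [] = S.map (fun c => [c]) := by
        simp only [pvInsAll, pvIns, List.take_nil, List.drop_nil]
        exact List.map_eq_flatMap.symm
      have h2 : (S.map (fun c => [c])).Nodup :=
        hS.map (fun a b h => by simpa using h)
      simp [h1, List.toFinset_card_of_nodup h2]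
  | cons a tl ih =>
      have haS : a ∈ S := hsub a (by simp)
      have htl : ∀ x ∈ tl, x ∈ S := fun x hx => hsub x (by simp [hx])
      have hrec := ih htl
      rw [pvInsAll_cons_toFinset]
      set X := (S.map (fun c => c :: a :: tl)).toFinset with hXdef
      set Y := Finset.image (fun u => a :: u) (pvInsAll S tl).toFinset with hYdef
      have hXcard : X.card = S.length := by
        have h2 : (S.map (fun c => c :: a :: tl)).Nodup :=
          hS.map (fun p q h => by simpa using h)
        simp [hXdef, List.toFinset_card_of_nodup h2]
      have hYcard : Y.card = (pvInsAll S tl).toFinset.card := by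
        apply Finset.card_image_of_injective
        intro p q h; simpa using h
      have hinter : X ∩ Y = {a :: a :: tl} := by
        ext x
        simp only [Finset.mem_inter, Finset.mem_singleton, hXdef, hYdef,
          List.mem_toFinset, List.mem_map, Finset.mem_image, mem_pvInsAll]
        constructor
        · rintro ⟨⟨c, _, rfl⟩, ⟨u, _, hu⟩⟩
          obtain ⟨h1, h2⟩ := List.cons.injEq .. ▸ hu
          simp_all
        · rintro rfl
          refine ⟨⟨a, haS, rfl⟩, ⟨a :: tl, ⟨a, haS, 0, by omega, (pvIns_zero _ _).symm⟩, rfl⟩⟩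
      have hio := Finset.card_union_add_card_inter X Y
      rw [hinter] at hio
      simp only [Finset.card_singleton] at hio
      have hr : (tl.length + 1 + 1) * S.length = (tl.length + 1) * S.length + S.length := by
        ring
      simp only [List.length_cons]
      omega

-- a Python set's size is the number of distinct elements of the source list
theorem pvSetLen_eq_toFinset_card {α : Type} [BEq α] [LawfulBEq α] [DecidableEq α]
    (L : List α) : (PySem.Set.ofList L).length = L.toFinset.card := by
  rw [← List.toFinset_card_of_nodup (PySem.Set.nodup_ofList L)]
  congr 1
  ext x
  simp [PySem.Set.mem_ofList]

-- the list A's set comprehension deduplicates is exactly pvInsAll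
theorem pvFlatMap_eq_pvInsAll (letters cs : List Char) :
    (letters.flatMap (fun c =>
        (PySem.List.pyRange 0 ((cs.length : Int) + 1) 1).map (fun i =>
          PySem.List.slice cs none (some i) ++ [c] ++ PySem.List.slice cs (some i) none)))
      = pvInsAll letters cs := by
  unfold pvInsAll
  have hfun : ∀ c : Char,
      ((PySem.List.pyRange 0 ((cs.length : Int) + 1) 1).map (fun i =>
          PySem.List.slice cs none (some i) ++ [c] ++ PySem.List.slice cs (some i) none))
        = (List.range (cs.length + 1)).map (fun i => pvIns cs c i) := by
    intro c
    rw [show ((cs.length : Int) + 1) = ((cs.length + 1 : Nat) : Int) by push_cast; ring,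
      PySem.List.pyRange_zero_natCast, List.map_map]
    apply List.map_congr_left
    intro i _
    simp [pvIns, PySem.List.slice_to_natCast, PySem.List.slice_from_natCast]
  exact List.flatMap_congr (fun c _ => hfun c)

-- ===== VERDICT (by name: the statement is the Claim_ definition above) =====
theorem solve_spec : Claim_equal_solve := by
  intro s _
  unfold Spec_solve solve solve_alt
  simp only [PySem.Str.len_eq]
  set cs := s.toList with hcs
  set letters : PySem.Set Char := PySem.Set.ofList cs with hlet
  rw [pvFlatMap_eq_pvInsAll letters cs]
  have hcount := pvInsAll_card letters cs (PySem.Set.nodup_ofList cs)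
    (fun x hx => (PySem.Set.mem_ofList cs x).mpr hx)
  have hdup : (PySem.Set.ofList (pvInsAll letters cs)).length
      = (pvInsAll letters cs).toFinset.card :=
    pvSetLen_eq_toFinset_card _
  have hlen : PySem.Set.len letters = (letters.length : Int) := rfl
  have hlen2 : PySem.Set.len (PySem.Set.ofList (pvInsAll letters cs))
      = (((pvInsAll letters cs).toFinset.card : Nat) : Int) := by
    rw [← hdup]; rfl
  rw [hlen, hlen2]
  have hZ : (((pvInsAll letters cs).toFinset.card : Nat) : Int)
      = ((cs.length : Int) + 1) * (letters.length : Int) - (cs.length : Int) := by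
    have h' : (((pvInsAll letters cs).toFinset.card : Nat) : Int) + (cs.length : Int)
        = ((cs.length : Int) + 1) * (letters.length : Int) := by exact_mod_cast hcount
    linarith
  rw [hZ]
  ring
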